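-- pv_equiv track=rewrite | github.com/pypi-data/pypi-mirror-395 | packages/humanmint/humanmint-2.0.1-py3-none-any.whl/humanmint/names/normalize.py | _validate_name_quality
-- ===== SOURCE A (Python) =====
-- from typing import Dict, Optional
--
-- def _validate_name_quality(
--     first: Optional[str], last: Optional[str], middle: Optional[str]
-- ) -> bool:
--     """
--     Validate name quality based on component presence and content.
--
--     A name is considered valid if:
--     - Has both first AND last names with at least 2 chars each and alphabetic content
--     - Has only first name with at least 2 chars and alphabetic content
--     - Has only last name (less common but acceptable)
--
--     A name is invalid if:
--     - Single character components
--     - No alphabetic characters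
--     - Only first OR last is a single letter/number
--
--     Args:
--         first: First name component
--         last: Last name component
--         middle: Middle name component (not required)
--
--     Returns:
--         True if name passes validation, False otherwise
--     """
--     # Both first and last names present - strict validation
--     if first and last:
--         first_valid = len(first) >= 2 and any(c.isalpha() for c in first)
--         last_valid = len(last) >= 2 and any(c.isalpha() for c in last)
--         return first_valid and last_valid
--
--     # Only first name - must be substantial
--     if first and not last:
--         return len(first) >= 2 and any(c.isalpha() for c in first)
--
--     # Only last name - less common but acceptable if substantial
--     if last and not first:
--         return len(last) >= 2 and any(c.isalpha() for c in last)
--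
--     # No first or last name
--     return False
-- ===== SOURCE B (Python) =====
-- def _validate_name_quality(first, last, middle):
--     # rank: 0 = absent/empty, 1 = present but weak, 2 = substantial
--     def rank(x):
--         if not x:
--             return 0
--         return 2 if len(x) >= 2 and any(c.isalpha() for c in x) else 1
--     TABLE = {
--         (0, 0): False, (0, 1): False, (0, 2): True,
--         (1, 0): False, (1, 1): False, (1, 2): False,
--         (2, 0): True,  (2, 1): False, (2, 2): True,
--     }
--     return TABLE[(rank(first), rank(last))]
-- ===== Notes on version B (the rewrite author's own statement) =====
-- stated objective: alternative
-- what changed: Replaces A's four if-branches of boolean logic with a classification into a three-valued rank (absent/weak/substantial) per component and a single precomputed 9-entry truth-table lookup on the rank pair.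
import Mathlib
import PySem

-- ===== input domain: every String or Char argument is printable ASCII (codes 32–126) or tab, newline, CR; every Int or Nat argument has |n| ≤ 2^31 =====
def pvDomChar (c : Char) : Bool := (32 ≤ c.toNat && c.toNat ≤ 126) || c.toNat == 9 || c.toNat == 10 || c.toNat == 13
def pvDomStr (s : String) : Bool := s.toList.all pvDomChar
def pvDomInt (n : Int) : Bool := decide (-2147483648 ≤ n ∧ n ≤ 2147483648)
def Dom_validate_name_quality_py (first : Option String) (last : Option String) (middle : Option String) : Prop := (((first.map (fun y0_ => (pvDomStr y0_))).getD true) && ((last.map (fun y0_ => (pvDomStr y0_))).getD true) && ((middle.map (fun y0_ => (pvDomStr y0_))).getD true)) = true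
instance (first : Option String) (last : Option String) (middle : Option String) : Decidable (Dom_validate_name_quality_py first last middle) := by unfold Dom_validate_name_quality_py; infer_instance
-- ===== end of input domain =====

-- B replaces A's four boolean branches by a three-valued rank per component and one 9-entry truth-table lookup (objective: alternative decomposition).

-- ===== PORT A =====
-- truthiness of an Optional[str]: None and "" are falsy
def pyTruthy (o : Option String) : Bool :=
  match o with
  | none => false
  | some s => !(s == "")

-- literal transliteration of A's four-branch validation
def validate_name_quality_py (first : Option String) (last : Option String) (middle : Option String) : Bool :=
  let f := first.getD ""
  let l := last.getD ""
  if pyTruthy first && pyTruthy last then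
    (decide (2 ≤ PySem.Str.len f) && f.toList.any PySem.Chars.isalpha)
      && (decide (2 ≤ PySem.Str.len l) && l.toList.any PySem.Chars.isalpha)
  else if pyTruthy first && !(pyTruthy last) then
    decide (2 ≤ PySem.Str.len f) && f.toList.any PySem.Chars.isalpha
  else if pyTruthy last && !(pyTruthy first) then
    decide (2 ≤ PySem.Str.len l) && l.toList.any PySem.Chars.isalpha
  else
    false

-- ===== PORT B =====
-- rank: 0 = absent/empty, 1 = present but weak, 2 = substantial
def pyRank (o : Option String) : Nat :=
  match o with
  | none => 0
  | some s =>
    if s == "" then 0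
    else if decide (2 ≤ PySem.Str.len s) && s.toList.any PySem.Chars.isalpha then 2 else 1

-- the 9-entry truth table keyed on the rank pair (dict lookup; all keys present)
def pyRankTable : PySem.Dict (Nat × Nat) Bool :=
  PySem.Dict.ofList
  [((0,0),false), ((0,1),false), ((0,2),true),
   ((1,0),false), ((1,1),false), ((1,2),false),
   ((2,0),true),  ((2,1),false), ((2,2),true)]

def validate_name_quality_py_alt (first : Option String) (last : Option String) (middle : Option String) : Bool :=
  PySem.Dict.getD pyRankTable (pyRank first, pyRank last) false

-- ===== PRECONDITION & SPEC =====
def Spec_validate_name_quality_py (first : Option String) (last : Option String) (middle : Option String) (out : Bool) : Prop := out = validate_name_quality_py_alt first last middle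
instance (first : Option String) (last : Option String) (middle : Option String) (out : Bool) : Decidable (Spec_validate_name_quality_py first last middle out) := by unfold Spec_validate_name_quality_py; infer_instance

-- ===== CLAIM =====
def Claim_equal_validate_name_quality_py : Prop := ∀ (first : Option String) (last : Option String) (middle : Option String), Dom_validate_name_quality_py first last middle → Spec_validate_name_quality_py first last middle (validate_name_quality_py first last middle)

-- ===== LEMMAS AND PROOFS =====

-- ===== VERDICT =====
theorem validate_name_quality_py_spec : Claim_equal_validate_name_quality_py := by
  intro first last middle _
  unfold Spec_validate_name_quality_py validate_name_quality_py validate_name_quality_py_alt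
    pyTruthy pyRank
  match first, last with
  | none, none => rfl
  | none, some b =>
    by_cases hb : b = "" <;>
      by_cases sb : (decide (2 ≤ b.length) && b.toList.any PySem.Chars.isalpha) = true <;>
        simp [hb, sb, PySem.Str.len] <;> decide
  | some a, none =>
    by_cases ha : a = "" <;>
      by_cases sa : (decide (2 ≤ a.length) && a.toList.any PySem.Chars.isalpha) = true <;>
        simp [ha, sa, PySem.Str.len] <;> decide
  | some a, some b =>
    by_cases ha : a = "" <;> by_cases hb : b = "" <;>
      by_cases sa : (decide (2 ≤ a.length) && a.toList.any PySem.Chars.isalpha) = true <;>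
        by_cases sb : (decide (2 ≤ b.length) && b.toList.any PySem.Chars.isalpha) = true <;>
          simp [ha, hb, sa, sb, PySem.Str.len] <;> decide
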